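-- pv_equiv track=rewrite | github.com/Akshayanti/Lisca_Low_Resource | generalScripts/process_wiki_dump.py | standardize_quotes
-- ===== SOURCE A (Python) =====
-- def standardize_quotes(line):
--     tokens = line.split()
--     token_out = []
--     for token in tokens:
--         token2 = token.replace("`", "\'")
--         token2 = token2.replace("\'\'\'", "")
--         token2 = token2.replace("\'\'", "\"")
--         token2 = token2.replace("\"\'", "\"")
--         token2 = token2.replace("\'\"", "\"")
--         token_out.append(token2)
--     outline = " ".join(token_out)
--     outline = outline.replace("\' \"", "\"")
--     outline = outline.replace("\" \'", "\"")
--     outline = outline.replace("\' \'", "\'")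
--     return outline
-- ===== SOURCE B (Python) =====
-- def standardize_quotes(line):
--     # Whitespace-normalize first, then apply the replacements to the whole
--     # string: no replacement pattern in the token phase contains a space, so
--     # matches never cross token boundaries and the per-token loop is unneeded.
--     outline = " ".join(line.split())
--     outline = outline.replace("`", "'")
--     outline = outline.replace("'''", "")
--     outline = outline.replace("''", "\"")
--     outline = outline.replace("\"'", "\"")
--     outline = outline.replace("'\"", "\"")
--     outline = outline.replace("' \"", "\"")
--     outline = outline.replace("\" '", "\"")
--     outline = outline.replace("' '", "'")
--     return outline
-- ===== Notes on version B (the rewrite author's own statement) =====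
-- stated objective: simpler
-- what changed: Replaces A's per-token loop (split, replace each token, collect, join) by one whitespace-normalizing join up front followed by the same eight sequential replaces applied to the whole string; this is valid because no token-phase pattern contains a space, so matches never cross token boundaries.
import Mathlib
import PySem

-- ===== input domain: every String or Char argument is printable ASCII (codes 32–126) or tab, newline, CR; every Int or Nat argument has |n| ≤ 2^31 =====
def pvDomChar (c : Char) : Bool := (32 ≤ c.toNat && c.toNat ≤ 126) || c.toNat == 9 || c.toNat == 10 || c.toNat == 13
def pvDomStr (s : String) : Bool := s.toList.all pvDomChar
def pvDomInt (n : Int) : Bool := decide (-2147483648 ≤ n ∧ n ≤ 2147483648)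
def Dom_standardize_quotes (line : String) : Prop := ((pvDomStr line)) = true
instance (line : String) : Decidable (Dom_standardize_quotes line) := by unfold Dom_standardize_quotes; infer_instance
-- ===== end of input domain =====

-- B joins the whitespace-split tokens first and applies the eight sequential replaces
-- to the whole string, dropping A's per-token loop (objective: simpler; no space occurs
-- in any token-phase pattern, so matches never cross token boundaries).


-- ===== PORT A =====
def standardize_quotes (line : String) : String :=
  let tokens := PySem.Str.split₀ line
  let token_out := tokens.foldl (fun acc token =>
    let token2 := PySem.Str.replace token "`" "'"
    let token2 := PySem.Str.replace token2 "'''" ""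
    let token2 := PySem.Str.replace token2 "''" "\""
    let token2 := PySem.Str.replace token2 "\"'" "\""
    let token2 := PySem.Str.replace token2 "'\"" "\""
    acc ++ [token2]) []
  let outline := PySem.Str.join " " token_out
  let outline := PySem.Str.replace outline "' \"" "\""
  let outline := PySem.Str.replace outline "\" '" "\""
  PySem.Str.replace outline "' '" "'"

-- ===== PORT B =====
def standardize_quotes_alt (line : String) : String :=
  let outline := PySem.Str.join " " (PySem.Str.split₀ line)
  let outline := PySem.Str.replace outline "`" "'"
  let outline := PySem.Str.replace outline "'''" ""
  let outline := PySem.Str.replace outline "''" "\""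
  let outline := PySem.Str.replace outline "\"'" "\""
  let outline := PySem.Str.replace outline "'\"" "\""
  let outline := PySem.Str.replace outline "' \"" "\""
  let outline := PySem.Str.replace outline "\" '" "\""
  PySem.Str.replace outline "' '" "'"

-- ===== PRECONDITION & SPEC =====
def Spec_standardize_quotes (line : String) (out : String) : Prop := out = standardize_quotes_alt line
instance (line : String) (out : String) : Decidable (Spec_standardize_quotes line out) := by unfold Spec_standardize_quotes; infer_instance

-- ===== CLAIM (what is proved, stated in full; the proofs are below) =====
def Claim_equal_standardize_quotes : Prop := ∀ (line : String), Dom_standardize_quotes line → Spec_standardize_quotes line (standardize_quotes line)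

-- ===== LEMMAS AND PROOFS =====

-- A clean structural characterisation of Python's str.replace for a nonempty pattern.
def repC (old new : List Char) : List Char → List Char
  | [] => []
  | c :: t =>
    if old.isPrefixOf (c :: t) then new ++ repC old new (List.drop (old.length - 1) t)
    else c :: repC old new t
termination_by l => l.length
decreasing_by
  · simp only [List.length_cons, List.length_drop]; omega
  · simp

theorem repC_go (old new : List Char) (hold : old ≠ []) :
    ∀ (fuel : Nat) (l acc : List Char), l.length ≤ fuel →
      PySem.Chars.replace.go old new fuel l acc = acc.reverse ++ repC old new l := by
  intro fuel
  induction fuel with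
  | zero =>
    intro l acc hl
    have : l = [] := List.eq_nil_of_length_eq_zero (Nat.le_zero.mp hl)
    subst this
    simp [PySem.Chars.replace.go, repC]
  | succ n ih =>
    intro l acc hl
    cases l with
    | nil => simp [PySem.Chars.replace.go, repC]
    | cons c t =>
      rw [PySem.Chars.replace.go]
      by_cases hp : old.isPrefixOf (c :: t)
      · have hlen : old.length ≤ t.length + 1 := by
          simpa using (List.isPrefixOf_iff_prefix.mp hp).length_le
        have h1 : 1 ≤ old.length := by
          cases old with
          | nil => exact absurd rfl hold
          | cons _ _ => simp
        have hdrop : List.drop old.length (c :: t) = List.drop (old.length - 1) t := by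
          cases old with
          | nil => exact absurd rfl hold
          | cons _ _ => simp
        rw [if_pos hp, hdrop,
          ih _ _ (by simp only [List.length_drop]; simp only [List.length_cons] at hl; omega)]
        conv_rhs => rw [repC, if_pos hp]
        simp
      · rw [if_neg hp, ih _ _ (by simp only [List.length_cons] at hl; omega)]
        conv_rhs => rw [repC, if_neg hp]
        simp

theorem replace_eq_repC (l old new : List Char) (hold : old ≠ []) :
    PySem.Chars.replace l old new = repC old new l := by
  rw [PySem.Chars.replace, if_neg (by simpa using hold)]
  simpa using repC_go old new hold l.length l [] le_rfl

-- If the pattern contains no space, matches never cross a space.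
theorem repC_append_space (old new : List Char) (hold : old ≠ []) (hsp : ' ' ∉ old) :
    ∀ (n : Nat) (t : List Char), t.length ≤ n → ∀ (rest : List Char),
      repC old new (t ++ ' ' :: rest) = repC old new t ++ ' ' :: repC old new rest := by
  intro n
  induction n with
  | zero =>
    intro t ht rest
    have : t = [] := List.eq_nil_of_length_eq_zero (Nat.le_zero.mp ht)
    subst this
    have hnp : ¬ old.isPrefixOf (' ' :: rest) := by
      intro hp
      have := List.isPrefixOf_iff_prefix.mp hp
      cases old with
      | nil => exact absurd rfl hold
      | cons o os =>
        have ho : o = ' ' := (List.cons_prefix_cons.mp this).1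
        exact hsp (by simp [ho])
    simp [repC, hnp]
  | succ n ih =>
    intro t ht rest
    cases t with
    | nil => exact ih [] (by simp) rest
    | cons c t' =>
      have hcons : (c :: t') ++ ' ' :: rest = c :: (t' ++ ' ' :: rest) := by simp
      by_cases hp : old <+: (c :: t')
      · -- a match at the head survives the extension
        have hpb : old.isPrefixOf (c :: t') = true := List.isPrefixOf_iff_prefix.mpr hp
        have hlong : old <+: c :: (t' ++ ' ' :: rest) := by
          have := hp.trans (List.prefix_append (c :: t') (' ' :: rest))
          simpa using this
        have hlen : old.length ≤ t'.length + 1 := by simpa using hp.length_le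
        have hdrop : List.drop (old.length - 1) (t' ++ ' ' :: rest) =
            List.drop (old.length - 1) t' ++ ' ' :: rest :=
          List.drop_append_of_le_length (by omega)
        rw [hcons, repC, if_pos (List.isPrefixOf_iff_prefix.mpr hlong), hdrop,
          ih _ (by simp only [List.length_drop]; simp only [List.length_cons] at ht; omega)]
        rw [repC, if_pos hpb]
        simp
      · -- no match at the head of the short list: none at the head of the long one either
        have hnp : ¬ old <+: c :: (t' ++ ' ' :: rest) := by
          intro hlong
          by_cases hlen : old.length ≤ (c :: t').length
          · apply hp
            have htake : old = (c :: (t' ++ ' ' :: rest)).take old.length :=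
              List.prefix_iff_eq_take.mp hlong
            rw [← hcons, List.take_append_of_le_length hlen] at htake
            rw [htake]
            exact List.take_prefix _ _
          · apply hsp
            have htake : old = (c :: (t' ++ ' ' :: rest)).take old.length :=
              List.prefix_iff_eq_take.mp hlong
            rw [← hcons, List.take_append] at htake
            rw [List.take_of_length_le (by simp at hlen ⊢; omega)] at htake
            have hpos : 0 < old.length - (c :: t').length := by simp at hlen ⊢; omega
            rw [htake]
            refine List.mem_append_right _ ?_
            cases h : old.length - (c :: t').length with
            | zero => omega
            | succ k => simp
        rw [hcons, repC, if_neg ((Bool.not_eq_true _).mpr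
              (List.isPrefixOf_iff_prefix.not.mpr hnp |> fun h => by
                simpa using (Bool.eq_false_iff.mpr (by simpa [List.isPrefixOf_iff_prefix] using hnp)))),
          ih _ (by simp only [List.length_cons] at ht; omega)]
        rw [repC, if_neg (by simpa [List.isPrefixOf_iff_prefix] using hp)]
        simp

-- Replace with a space-free nonempty pattern distributes over a space-join.
theorem replace_join (old new : List Char) (hold : old ≠ []) (hsp : ' ' ∉ old) :
    ∀ (ts : List (List Char)),
      PySem.Chars.replace (PySem.Chars.join [' '] ts) old new =
        PySem.Chars.join [' '] (ts.map (fun t => PySem.Chars.replace t old new)) := by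
  intro ts
  induction ts with
  | nil =>
    rw [PySem.Chars.join_nil, List.map_nil, PySem.Chars.join_nil,
      replace_eq_repC _ _ _ hold, repC]
  | cons t ts ih =>
    cases ts with
    | nil =>
      rw [List.map_singleton, PySem.Chars.join_singleton, PySem.Chars.join_singleton]
    | cons u us =>
      rw [PySem.Chars.join_cons_cons, List.map_cons, List.map_cons,
        PySem.Chars.join_cons_cons]
      rw [List.map_cons] at ih
      have hl : t ++ [' '] ++ PySem.Chars.join [' '] (u :: us) =
          t ++ ' ' :: PySem.Chars.join [' '] (u :: us) := by simp
      rw [hl, replace_eq_repC _ _ _ hold,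
        repC_append_space old new hold hsp t.length t le_rfl (PySem.Chars.join [' '] (u :: us)),
        ← replace_eq_repC t _ _ hold, ← replace_eq_repC _ _ _ hold, ih]
      simp

-- ===== VERDICT (by name: the statement is the Claim_ definition above) =====
theorem standardize_quotes_spec : Claim_equal_standardize_quotes := by
  intro line _
  unfold Spec_standardize_quotes standardize_quotes standardize_quotes_alt
  apply String.toList_inj.mp
  simp only [PySem.List.foldl_append_singleton_eq_map, List.nil_append,
    PySem.Str.toList_replace, PySem.Str.toList_join, List.map_map]
  have hsep : " ".toList = [' '] := rfl
  rw [hsep]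
  rw [replace_join "`".toList "'".toList (by decide) (by decide)]
  rw [replace_join "'''".toList "".toList (by decide) (by decide)]
  rw [replace_join "''".toList "\"".toList (by decide) (by decide)]
  rw [replace_join "\"'".toList "\"".toList (by decide) (by decide)]
  rw [replace_join "'\"".toList "\"".toList (by decide) (by decide)]
  simp only [Function.comp_def, List.map_map, PySem.Str.toList_replace]
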